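-- pv_equiv track=rewrite | github.com/mrmjordanai/phonelogai | workers/src/phonelogai_workers/ml/layout_classifier.py | _detect_delimiters
-- ===== SOURCE A (Python) =====
-- from typing import Dict, List, Tuple, Optional, Any, Union
--
-- def _detect_delimiters(content: str) -> List[str]:
--     """Detect possible delimiters in content"""
--     candidates = [',', '|', '\t', ';', ':', ' ']
--     detected = []
--
--     lines = content.split('\n')[:10]  # Sample first 10 lines
--
--     for delimiter in candidates:
--         delimiter_count = sum(line.count(delimiter) for line in lines)
--         if delimiter_count > len(lines):  # More delimiters than lines
--             detected.append(delimiter)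
--
--     return detected
-- ===== SOURCE B (Python) =====
-- def _detect_delimiters(content: str):
--     """Detect possible delimiters in content: stream over the raw text once,
--     stopping at the 10th newline, with no line splitting at all."""
--     candidates = [',', '|', '\t', ';', ':', ' ']
--     counts = {c: 0 for c in candidates}
--     newlines = 0
--     for ch in content:
--         if ch == '\n':
--             newlines += 1
--             if newlines == 10:
--                 break
--         elif ch in counts:
--             counts[ch] += 1
--     n_lines = min(newlines + 1, 10)
--     return [d for d in candidates if counts[d] > n_lines]
-- ===== Notes on version B (the rewrite author's own statement) =====
-- stated objective: alternative
-- what changed: B never splits the content into lines: it streams once over the raw characters, tallying candidate characters and counting newlines with an early break at the 10th newline, then derives the line count as min(newlines+1, 10); A splits into a line list and runs six separate per-candidate count-and-sum passes over it.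
import Mathlib
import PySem

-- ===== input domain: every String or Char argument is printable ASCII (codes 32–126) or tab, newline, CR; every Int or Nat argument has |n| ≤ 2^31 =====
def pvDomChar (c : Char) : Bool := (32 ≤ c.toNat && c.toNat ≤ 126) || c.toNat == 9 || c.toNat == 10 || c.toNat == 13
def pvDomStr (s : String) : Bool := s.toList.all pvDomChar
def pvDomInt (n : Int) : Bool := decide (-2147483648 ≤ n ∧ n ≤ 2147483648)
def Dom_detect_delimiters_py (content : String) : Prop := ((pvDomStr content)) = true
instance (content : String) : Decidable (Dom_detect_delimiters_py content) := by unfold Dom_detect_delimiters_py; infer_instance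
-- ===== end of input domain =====

-- B streams once over the raw content, counting candidate characters and stopping at the 10th
-- newline, with no line splitting at all (alternative decomposition, single pass with early exit).


-- ===== PORT A =====
-- literal transliteration of _detect_delimiters: split into lines, take 10, and for each
-- candidate sum line.count(delimiter) over the lines, appending when the sum exceeds len(lines)
def detect_delimiters_py (content : String) : List String :=
  let candidates : List String := [",", "|", "\t", ";", ":", " "]
  let lines := PySem.List.slice ((PySem.Str.split? content "\n").getD []) none (some 10)
  candidates.foldl (fun detected delimiter =>
    let delimiter_count := (lines.map (fun line => PySem.Str.count line delimiter)).sum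
    if delimiter_count > lines.length then detected ++ [delimiter] else detected) []

-- ===== PORT B =====
-- the streaming loop of Source B: one pass over the characters, incrementing the per-candidate
-- table, counting newlines and breaking when the 10th newline is reached
def ddAltLoop : List Char → PySem.Dict Char Int → Nat → PySem.Dict Char Int × Nat
  | [], counts, newlines => (counts, newlines)
  | ch :: rest, counts, newlines =>
    if ch = '\n' then
      if newlines + 1 = 10 then (counts, newlines + 1)
      else ddAltLoop rest counts (newlines + 1)
    else if counts.contains ch then
      ddAltLoop rest (counts.insert ch (counts.getD ch 0 + 1)) newlines
    else ddAltLoop rest counts newlines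

def detect_delimiters_py_alt (content : String) : List String :=
  let candidates : List Char := [',', '|', '\t', ';', ':', ' ']
  let counts0 : PySem.Dict Char Int := candidates.foldl (fun d c => d.insert c 0) PySem.Dict.empty
  let r := ddAltLoop content.toList counts0 0
  let n : Int := min ((r.2 : Int) + 1) 10
  (candidates.filter (fun d => r.1.getD d 0 > n)).map (fun d => String.ofList [d])

-- ===== PRECONDITION & SPEC =====
def Spec_detect_delimiters_py (content : String) (out : List String) : Prop := out = detect_delimiters_py_alt content
instance (content : String) (out : List String) : Decidable (Spec_detect_delimiters_py content out) := by unfold Spec_detect_delimiters_py; infer_instance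

-- ===== CLAIM (what is proved, stated in full; the proofs are below) =====
def Claim_equal_detect_delimiters_py : Prop := ∀ (content : String), Dom_detect_delimiters_py content → Spec_detect_delimiters_py content (detect_delimiters_py content)

-- ===== LEMMAS AND PROOFS =====

-- occurrences of c among the characters of cs that lie before the k-th newline
def streamCount (c : Char) : List Char → Nat → Nat
  | [], _ => 0
  | x :: r, k =>
    if x = '\n' then (if k = 1 then 0 else streamCount c r (k - 1))
    else (if x = c then 1 else 0) + streamCount c r k

-- PySem's general-separator splitOn coincides with Mathlib's splitOn for the one-char separator
theorem splitOn_go_newline (fuel : Nat) (l cur : List Char) (acc : List (List Char))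
    (h : l.length ≤ fuel) :
    PySem.Chars.splitOn.go ['\n'] fuel l cur acc
      = acc.reverse ++ (l.splitOn '\n').modifyHead (cur.reverse ++ ·) := by
  induction l generalizing fuel cur acc with
  | nil => cases fuel <;> simp [PySem.Chars.splitOn.go, List.splitOn, List.splitOnP_nil]
  | cons x rest ih =>
    cases fuel with
    | zero => simp at h
    | succ n =>
      simp only [List.length_cons, Nat.succ_le_succ_iff] at h
      by_cases hx : x = '\n'
      · subst hx
        simp only [PySem.Chars.splitOn.go, List.isPrefixOf, beq_self_eq_true, Bool.true_and,
          if_true, List.length_cons, List.length_nil]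
        have hdrop : List.drop (0 + 1) ('\n' :: rest) = rest := rfl
        rw [hdrop, ih n [] (cur.reverse :: acc) h]
        obtain ⟨hd, tl, he⟩ := List.exists_cons_of_ne_nil (List.splitOnP_ne_nil (· == '\n') rest)
        simp [List.splitOn] at he ⊢
        simp [he, List.modifyHead]
      · have hpre : (['\n'].isPrefixOf (x :: rest)) = false := by
          simp [List.isPrefixOf]; exact fun hc => absurd hc.symm hx
        simp only [PySem.Chars.splitOn.go, hpre, if_neg, Bool.false_eq_true, not_false_iff]
        rw [ih n (x :: cur) acc h]
        simp only [List.splitOn, List.splitOnP_cons, beq_iff_eq, hx, if_false]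
        obtain ⟨hd, tl, he⟩ := List.exists_cons_of_ne_nil (List.splitOnP_ne_nil (· == '\n') rest)
        simp [he, List.modifyHead]

theorem chars_splitOn_newline (cs : List Char) :
    PySem.Chars.splitOn cs ['\n'] = cs.splitOn '\n' := by
  unfold PySem.Chars.splitOn
  rw [splitOn_go_newline (cs.length + 1) cs [] [] (by omega)]
  obtain ⟨hd, tl, he⟩ := List.exists_cons_of_ne_nil (List.splitOnP_ne_nil (· == '\n') cs)
  simp [List.splitOn] at he ⊢
  simp [he, List.modifyHead]

-- number of lines = number of newlines + 1
theorem splitOn_newline_length (cs : List Char) :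
    (cs.splitOn '\n').length = cs.count '\n' + 1 := by
  induction cs with
  | nil => simp [List.splitOn, List.splitOnP_nil]
  | cons x rest ih =>
    simp only [List.splitOn, List.splitOnP_cons, beq_iff_eq] at ih ⊢
    by_cases hx : x = '\n'
    · simp [hx, ih]
    · simp [hx, ih]

-- the summed per-line counts of the first k lines are the stream counts before the k-th newline
theorem sum_take_count (c : Char) (_hc : c ≠ '\n') (cs : List Char) (k : Nat) (hk : 1 ≤ k) :
    (((cs.splitOn '\n').take k).map (fun l => l.count c)).sum = streamCount c cs k := by
  induction cs generalizing k with
  | nil =>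
    cases k with
    | zero => omega
    | succ k' => simp [List.splitOn, List.splitOnP_nil, streamCount]
  | cons x rest ih =>
    simp only [List.splitOn, List.splitOnP_cons, beq_iff_eq] at ih ⊢
    by_cases hx : x = '\n'
    · subst hx
      simp only [if_true, streamCount]
      cases k with
      | zero => omega
      | succ k' =>
        by_cases h1 : k' + 1 = 1
        · simp [h1]
        · have hk' : 1 ≤ k' := by omega
          simp only [if_neg h1, Nat.add_sub_cancel]
          rw [← ih k' hk']
          simp [List.take_succ_cons]
    · obtain ⟨hd, tl, he⟩ := List.exists_cons_of_ne_nil (List.splitOnP_ne_nil (· == '\n') rest)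
      cases k with
      | zero => omega
      | succ k' =>
        have hih := ih (k' + 1) hk
        simp only [he, List.modifyHead, List.take_succ_cons, List.map_cons, List.sum_cons] at hih ⊢
        rw [if_neg hx]
        simp only [streamCount, if_neg hx, ← hih]
        by_cases hxc : x = c <;> simp [hxc] <;> omega

-- the streaming loop: final newline count and final table, for any table whose key set is fixed
theorem ddAltLoop_spec (cs : List Char) (d : PySem.Dict Char Int) (m : Nat) (hm : m < 10)
    (hkeys : ∀ x, d.contains x = decide (x ∈ ([',', '|', '\t', ';', ':', ' '] : List Char))) :
    (ddAltLoop cs d m).2 = m + min (cs.count '\n') (10 - m) ∧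
    ∀ c ∈ ([',', '|', '\t', ';', ':', ' '] : List Char),
      (ddAltLoop cs d m).1.getD c 0 = d.getD c 0 + (streamCount c cs (10 - m) : Int) := by
  induction cs generalizing d m with
  | nil => simp [ddAltLoop, streamCount]
  | cons x rest ih =>
    by_cases hx : x = '\n'
    · subst hx
      by_cases h10 : m + 1 = 10
      · have hm9 : m = 9 := by omega
        subst hm9
        simp [ddAltLoop, streamCount]
      · have hm' : m + 1 < 10 := by omega
        obtain ⟨h2, h1⟩ := ih d (m + 1) hm' hkeys
        have hred : ddAltLoop ('\n' :: rest) d m = ddAltLoop rest d (m + 1) := by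
          simp [ddAltLoop, h10]
        constructor
        · rw [hred, h2]
          simp only [List.count_cons, beq_self_eq_true, if_true]
          omega
        · intro c hcmem
          rw [hred, h1 c hcmem]
          have hne1 : ¬ (10 - m = 1) := by omega
          simp only [streamCount, if_neg hne1]
          have h11 : 10 - m - 1 = 10 - (m + 1) := by omega
          simp [h11]
    · have hcnt : (x :: rest).count '\n' = rest.count '\n' := by
        simp [hx]
      by_cases hmem : x ∈ ([',', '|', '\t', ';', ':', ' '] : List Char)
      · have hcont : d.contains x = true := by rw [hkeys]; simp [hmem]
        have hred : ddAltLoop (x :: rest) d m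
            = ddAltLoop rest (d.insert x (d.getD x 0 + 1)) m := by
          simp [ddAltLoop, hx, hcont]
        have hkeys' : ∀ y, (d.insert x (d.getD x 0 + 1)).contains y
            = decide (y ∈ ([',', '|', '\t', ';', ':', ' '] : List Char)) := by
          intro y
          rw [PySem.Dict.contains_insert, hkeys]
          by_cases hyx : y = x
          · subst hyx; simp [hmem]
          · simp [hyx]
        obtain ⟨h2, h1⟩ := ih (d.insert x (d.getD x 0 + 1)) m hm hkeys'
        refine ⟨by rw [hred, h2, hcnt], ?_⟩
        intro c hcmem
        rw [hred, h1 c hcmem, PySem.Dict.getD_insert]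
        have hk1 : 1 ≤ 10 - m := by omega
        simp only [streamCount, if_neg hx]
        by_cases hcx : c = x
        · subst hcx; simp; ring
        · have hxc : ¬ x = c := fun h => hcx h.symm
          simp [hcx, hxc]
      · have hcont : d.contains x = false := by rw [hkeys]; simp [hmem]
        have hred : ddAltLoop (x :: rest) d m = ddAltLoop rest d m := by
          simp [ddAltLoop, hx, hcont]
        obtain ⟨h2, h1⟩ := ih d m hm hkeys
        refine ⟨by rw [hred, h2, hcnt], ?_⟩
        intro c hcmem
        rw [hred, h1 c hcmem]
        have hcx : x ≠ c := fun h => hmem (h ▸ hcmem)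
        simp [streamCount, hx, hcx]

-- single-character substring count is the element count
theorem chars_count_go_single (c : Char) (l : List Char) (fuel acc : Nat)
    (h : l.length ≤ fuel) :
    PySem.Chars.count.go [c] fuel l acc = acc + l.count c := by
  induction l generalizing fuel acc with
  | nil => cases fuel <;> simp [PySem.Chars.count.go]
  | cons x t ih =>
    cases fuel with
    | zero => simp at h
    | succ n =>
      simp only [List.length_cons, Nat.succ_le_succ_iff] at h
      by_cases hc : c = x
      · subst hc
        simp [PySem.Chars.count.go, List.isPrefixOf, ih n (acc + 1) h]
        omega
      · simp [PySem.Chars.count.go, List.isPrefixOf, hc, ih n acc h, Ne.symm hc]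

theorem chars_count_single (s : List Char) (c : Char) :
    PySem.Chars.count s [c] = s.count c := by
  have h := chars_count_go_single c s s.length 0 le_rfl
  simp [PySem.Chars.count, h]

-- the initial table of Source B: keys are exactly the candidates, all counts zero
theorem counts0_contains : ∀ x, ((([',', '|', '\t', ';', ':', ' '] : List Char).foldl
    (fun d c => d.insert c 0) (PySem.Dict.empty : PySem.Dict Char Int)).contains x)
    = decide (x ∈ ([',', '|', '\t', ';', ':', ' '] : List Char)) := by
  intro x
  simp only [List.foldl, PySem.Dict.contains_insert, PySem.Dict.contains_empty, List.mem_cons]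
  by_cases h1 : x = ',' <;> by_cases h2 : x = '|' <;> by_cases h3 : x = '\t' <;>
    by_cases h4 : x = ';' <;> by_cases h5 : x = ':' <;> by_cases h6 : x = ' ' <;>
    simp [h1, h2, h3, h4, h5, h6]

theorem counts0_getD : ∀ c ∈ ([',', '|', '\t', ';', ':', ' '] : List Char),
    ((([',', '|', '\t', ';', ':', ' '] : List Char).foldl
      (fun d c => d.insert c 0) (PySem.Dict.empty : PySem.Dict Char Int)).getD c 0) = 0 := by
  intro c hc
  fin_cases hc <;>
    simp [List.foldl, PySem.Dict.getD_insert]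

-- A's per-candidate condition equals B's per-candidate condition
theorem cond_eq (cs : List Char) (c : Char)
    (hmem : c ∈ ([',', '|', '\t', ';', ':', ' '] : List Char)) (hc : c ≠ '\n') :
    (((((cs.splitOn '\n').take 10).map String.ofList).map
        (fun line => PySem.Str.count line (String.ofList [c]))).sum
      > (((cs.splitOn '\n').take 10).map String.ofList).length)
    = ((ddAltLoop cs (([',', '|', '\t', ';', ':', ' '] : List Char).foldl
          (fun d c => d.insert c 0) PySem.Dict.empty) 0).1.getD c 0
        > min (((ddAltLoop cs (([',', '|', '\t', ';', ':', ' '] : List Char).foldl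
          (fun d c => d.insert c 0) PySem.Dict.empty) 0).2 : Int) + 1) 10) := by
  obtain ⟨h2, h1⟩ := ddAltLoop_spec cs _ 0 (by omega) counts0_contains
  apply propext
  rw [h1 c hmem, counts0_getD c hmem, h2]
  have hsum : (((cs.splitOn '\n').take 10).map String.ofList).map
      (fun line => PySem.Str.count line (String.ofList [c]))
      = ((cs.splitOn '\n').take 10).map (fun l => l.count c) := by
    rw [List.map_map]
    apply List.map_congr_left
    intro l _
    simp [chars_count_single]
  rw [hsum, sum_take_count c hc cs 10 (by omega), List.length_map, List.length_take,
    splitOn_newline_length]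
  push_cast
  omega

-- ===== VERDICT (by name: the statement is the Claim_ definition above) =====
theorem detect_delimiters_py_spec : Claim_equal_detect_delimiters_py := by
  intro content _
  unfold Spec_detect_delimiters_py detect_delimiters_py detect_delimiters_py_alt
  have hget : (PySem.Str.split? content "\n").getD []
      = (content.toList.splitOn '\n').map String.ofList := by
    simp [PySem.Str.split?, PySem.Chars.split?, chars_splitOn_newline]
  have hsl : PySem.List.slice ((content.toList.splitOn '\n').map String.ofList) none (some 10)
      = ((content.toList.splitOn '\n').take 10).map String.ofList := by
    have h := PySem.List.slice_to_natCast ((content.toList.splitOn '\n').map String.ofList) 10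
    rw [List.map_take]
    exact_mod_cast h
  simp only [hget, hsl]
  have hs1 : ("," : String) = String.ofList [','] := by decide
  have hs2 : ("|" : String) = String.ofList ['|'] := by decide
  have hs3 : ("\t" : String) = String.ofList ['\t'] := by decide
  have hs4 : (";" : String) = String.ofList [';'] := by decide
  have hs5 : (":" : String) = String.ofList [':'] := by decide
  have hs6 : (" " : String) = String.ofList [' '] := by decide
  rw [hs1, hs2, hs3, hs4, hs5, hs6]
  simp only [List.foldl_cons, List.foldl_nil, List.filter_cons, List.filter_nil,
    decide_eq_true_eq,
    cond_eq content.toList ',' (by decide) (by decide),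
    cond_eq content.toList '|' (by decide) (by decide),
    cond_eq content.toList '\t' (by decide) (by decide),
    cond_eq content.toList ';' (by decide) (by decide),
    cond_eq content.toList ':' (by decide) (by decide),
    cond_eq content.toList ' ' (by decide) (by decide)]
  split_ifs <;> simp
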